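-- pv_equiv track=rewrite | github.com/CAREamics/careamics | src/careamics/dataset_ng/image_stack/image_utils/czi_image_stack_utils.py | are_czi_axes_valid
-- ===== SOURCE A (Python) =====
-- def are_czi_axes_valid(axes: str) -> bool:
--     """
--     Check if the provided axes string is valid for CZI files.
--
--     CZI axes is always in the "SC(Z/T)YX" format, where Z or T are optional, and S and C
--     can be singleton dimensions, but must be provided.
--
--     Parameters
--     ----------
--     axes : str
--         The axes string to validate.
--
--     Returns
--     -------
--     bool
--         True if the axes string is valid, False otherwise.
--     """
--     valid_axes = {"S", "C", "Z", "T", "Y", "X"}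
--     axes_set = set(axes)
--
--     # check for invalid characters
--     if not axes_set.issubset(valid_axes):
--         return False
--
--     # check for mandatory axes
--     if not ({"S", "C", "Y", "X"}.issubset(axes_set)):
--         return False
--
--     # check for mutually exclusive axes
--     if "Z" in axes_set and "T" in axes_set:
--         return False
--
--     # check for correct order
--     order = "SCZYX" if "Z" in axes else "SCTYX"
--     last_index = -1
--     for axis in axes:
--         current_index = order.find(axis)
--         if current_index < last_index:
--             return False
--         last_index = current_index
--
--     return True
-- ===== SOURCE B (Python) =====
-- def are_czi_axes_valid(axes: str) -> bool:
--     axes_set = set(axes)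
--
--     # invalid characters
--     if not axes_set.issubset({"S", "C", "Z", "T", "Y", "X"}):
--         return False
--     # mandatory axes
--     if not {"S", "C", "Y", "X"}.issubset(axes_set):
--         return False
--     # mutually exclusive axes
--     if "Z" in axes_set and "T" in axes_set:
--         return False
--
--     # correct order: compare the rank list with its sorted form
--     order = "SCZYX" if "Z" in axes_set else "SCTYX"
--     ranks = [order.find(a) for a in axes]
--     return ranks == sorted(ranks)
-- ===== Notes on version B (the rewrite author's own statement) =====
-- stated objective: idiomatic
-- what changed: The stateful last_index scan checking monotone order is replaced by building the rank list [order.find(a) for a in axes] and comparing it with its sorted form.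
import Mathlib
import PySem

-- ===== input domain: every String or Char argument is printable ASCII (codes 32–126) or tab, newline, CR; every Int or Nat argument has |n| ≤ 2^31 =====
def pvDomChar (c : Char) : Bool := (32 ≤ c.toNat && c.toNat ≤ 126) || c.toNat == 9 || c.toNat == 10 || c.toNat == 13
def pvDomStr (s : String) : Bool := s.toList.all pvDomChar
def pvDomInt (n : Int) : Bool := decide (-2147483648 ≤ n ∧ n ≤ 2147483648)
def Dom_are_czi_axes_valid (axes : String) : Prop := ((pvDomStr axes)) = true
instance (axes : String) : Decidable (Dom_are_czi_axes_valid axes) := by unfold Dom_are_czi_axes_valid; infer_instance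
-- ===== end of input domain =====

-- B replaces A's stateful last_index order scan by comparing the rank list with its sorted form (idiomatic; same result).

-- ===== PORT A =====
-- the 'for axis in axes' loop with early return on a rank decrease
def pvALoop (order : List Char) : List Char → Int → Bool
  | [], _ => true
  | a :: rest, last =>
    let cur := PySem.Chars.find order [a]
    if cur < last then false else pvALoop order rest cur

def are_czi_axes_valid (axes : String) : Bool :=
  let validAxes : PySem.Set Char := PySem.Set.ofList ['S','C','Z','T','Y','X']
  let axesSet : PySem.Set Char := PySem.Set.ofList axes.toList
  if !(PySem.Set.issubset axesSet validAxes) then false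
  else if !(PySem.Set.issubset (PySem.Set.ofList ['S','C','Y','X']) axesSet) then false
  else if PySem.Set.contains axesSet 'Z' && PySem.Set.contains axesSet 'T' then false
  else
    let order := if PySem.Str.isIn "Z" axes then "SCZYX".toList else "SCTYX".toList
    pvALoop order axes.toList (-1)

-- ===== PORT B =====
def are_czi_axes_valid_alt (axes : String) : Bool :=
  let axesSet : PySem.Set Char := PySem.Set.ofList axes.toList
  if !(PySem.Set.issubset axesSet (PySem.Set.ofList ['S','C','Z','T','Y','X'])) then false
  else if !(PySem.Set.issubset (PySem.Set.ofList ['S','C','Y','X']) axesSet) then false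
  else if PySem.Set.contains axesSet 'Z' && PySem.Set.contains axesSet 'T' then false
  else
    let order := if PySem.Set.contains axesSet 'Z' then "SCZYX".toList else "SCTYX".toList
    let ranks := axes.toList.map (fun a => PySem.Chars.find order [a])
    decide (ranks = PySem.List.sorted ranks (fun x => x) false)

-- ===== PRECONDITION & SPEC =====
def Spec_are_czi_axes_valid (axes : String) (out : Bool) : Prop := out = are_czi_axes_valid_alt axes
instance (axes : String) (out : Bool) : Decidable (Spec_are_czi_axes_valid axes out) := by unfold Spec_are_czi_axes_valid; infer_instance

-- ===== CLAIM (what is proved, stated in full; the proofs are below) =====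
def Claim_equal_are_czi_axes_valid : Prop := ∀ (axes : String), Dom_are_czi_axes_valid axes → Spec_are_czi_axes_valid axes (are_czi_axes_valid axes)

-- ===== LEMMAS AND PROOFS =====

-- A's loop is true exactly when (last :: ranks) is a ≤-chain
theorem pvALoop_eq_chain (order : List Char) (cs : List Char) (last : Int) :
    pvALoop order cs last
      = decide (List.IsChain (· ≤ ·) (last :: cs.map (fun a => PySem.Chars.find order [a]))) := by
  induction cs generalizing last with
  | nil => simp [pvALoop]
  | cons a rest ih =>
    simp only [pvALoop, List.map_cons, List.isChain_cons]
    by_cases h : PySem.Chars.find order [a] < last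
    · simp [h, show ¬ last ≤ PySem.Chars.find order [a] by omega]
    · simp [h, ih, List.isChain_cons, List.head?_map, show last ≤ PySem.Chars.find order [a] by omega]

-- a list of Ints equals its own sort exactly when it is a ≤-chain
theorem eq_sorted_iff_chain (l : List Int) :
    l = PySem.List.sorted l (fun x => x) false ↔ List.IsChain (· ≤ ·) l := by
  constructor
  · intro h
    have h2 := PySem.List.sorted_pairwise (xs := l) (key := fun x => x)
    rw [← h] at h2
    rw [List.isChain_iff_pairwise]
    simpa using h2
  · intro h
    have hp : l.Pairwise (· ≤ ·) := List.isChain_iff_pairwise.mp h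
    exact (PySem.List.sorted_eq_self_of_pairwise (xs := l) (key := fun x => x) (by simpa using hp)).symm

-- dropping the initial -1 does not change the chain condition on rank lists
theorem chain_cons_neg_one (order : List Char) (cs : List Char) :
    List.IsChain (· ≤ ·) ((-1 : Int) :: cs.map (fun a => PySem.Chars.find order [a]))
      ↔ List.IsChain (· ≤ ·) (cs.map (fun a => PySem.Chars.find order [a])) := by
  rw [List.isChain_cons]
  constructor
  · exact fun h => h.2
  · intro h
    refine ⟨?_, h⟩
    intro b hb
    rcases List.head?_eq_some_iff.mp hb with ⟨t, ht⟩
    have hmem : b ∈ cs.map (fun a => PySem.Chars.find order [a]) := by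
      rw [ht]; exact List.mem_cons_self
    rcases List.mem_map.mp hmem with ⟨a, _, rfl⟩
    exact PySem.Chars.neg_one_le_find order [a]

-- "Z" in axes (substring test) agrees with 'Z' ∈ set(axes)
theorem isIn_Z_iff (axes : String) :
    PySem.Str.isIn "Z" axes = PySem.Set.contains (PySem.Set.ofList axes.toList) 'Z' := by
  rw [Bool.eq_iff_iff, PySem.Str.isIn_eq, PySem.Chars.isIn_iff_infix,
    PySem.Set.contains_iff, PySem.Set.mem_ofList]
  exact List.singleton_infix_iff 'Z' axes.toList

-- the order-check branch: A's loop from -1 equals B's sorted-comparison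
theorem order_branch (order : List Char) (cs : List Char) :
    pvALoop order cs (-1)
      = decide (cs.map (fun a => PySem.Chars.find order [a])
          = PySem.List.sorted (cs.map (fun a => PySem.Chars.find order [a])) (fun x => x) false) := by
  rw [pvALoop_eq_chain]
  refine decide_eq_decide.mpr ?_
  exact (chain_cons_neg_one order cs).trans (eq_sorted_iff_chain _).symm

-- ===== VERDICT (by name: the statement is the Claim_ definition above) =====
theorem are_czi_axes_valid_spec : Claim_equal_are_czi_axes_valid := by
  intro axes _
  unfold Spec_are_czi_axes_valid are_czi_axes_valid are_czi_axes_valid_alt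
  simp only [isIn_Z_iff]
  split_ifs <;> first | rfl | exact order_branch _ _
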